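-- pv_equiv track=rewrite | github.com/h-griffin/solo-projects | hackerrank/candles/candles.py | birthday_cake_candles
-- ===== SOURCE A (Python) =====
-- def birthday_cake_candles(ar):
--     """takes in an array of candle heights and returns the number of candels that are the tallest candles"""
--     tallest = float('-inf') # negative infinity
--     blown_out = 0
--     for candle in ar:
--         if candle == tallest:
--             blown_out += 1
--         if candle > tallest :   # if taller than tallest
--             blown_out = 0       # reset how many are blown out
--             tallest = candle    # set new tallest candle height
--             blown_out += 1      # add blown out candle
--     return blown_out
-- ===== SOURCE B (Python) =====
-- def birthday_cake_candles(ar):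
--     """takes in an array of candle heights and returns the number of candels that are the tallest candles"""
--     if not ar:
--         return 0
--     return ar.count(max(ar))
-- ===== Notes on version B (the rewrite author's own statement) =====
-- stated objective: simpler
-- what changed: Replaces A's single-pass running-maximum loop with manual reset/counter bookkeeping by the idiomatic two-pass max(ar) then ar.count(max), with an explicit 0 for the empty list.
import Mathlib
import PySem

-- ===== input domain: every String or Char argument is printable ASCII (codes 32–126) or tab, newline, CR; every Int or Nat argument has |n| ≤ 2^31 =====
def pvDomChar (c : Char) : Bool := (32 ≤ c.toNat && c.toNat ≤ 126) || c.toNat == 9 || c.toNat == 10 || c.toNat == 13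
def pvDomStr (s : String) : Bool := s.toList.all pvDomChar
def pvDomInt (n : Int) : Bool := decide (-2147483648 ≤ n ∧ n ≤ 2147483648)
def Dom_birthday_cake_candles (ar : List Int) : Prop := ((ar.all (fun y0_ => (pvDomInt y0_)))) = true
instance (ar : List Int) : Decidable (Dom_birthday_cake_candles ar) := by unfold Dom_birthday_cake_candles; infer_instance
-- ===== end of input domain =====

-- B: two-pass max-then-count instead of A's one-pass running maximum; equivalent on all inputs.
-- ===== PORT A =====
-- A's running state: tallest starts at float('-inf') (modelled as Option Int, none = -inf) and blown_out
def pvStepA (st : Option Int × Int) (candle : Int) : Option Int × Int :=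
  let blown_out := if st.1 = some candle then st.2 + 1 else st.2
  match st.1 with
  | none => (some candle, 1)            -- candle > -inf: reset to 0 then +1
  | some t => if candle > t then (some candle, 1) else (st.1, blown_out)

def birthday_cake_candles (ar : List Int) : Int :=
  (ar.foldl pvStepA (none, 0)).2

-- ===== PORT B =====
def birthday_cake_candles_alt (ar : List Int) : Int :=
  if ar = [] then 0
  else
    match PySem.List.max? ar (fun y => y) with
    | none => 0
    | some m => (PySem.List.count ar m : Int)

-- ===== PRECONDITION & SPEC =====
def Spec_birthday_cake_candles (ar : List Int) (out : Int) : Prop := out = birthday_cake_candles_alt ar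
instance (ar : List Int) (out : Int) : Decidable (Spec_birthday_cake_candles ar out) := by unfold Spec_birthday_cake_candles; infer_instance

-- ===== CLAIM (what is proved, stated in full; the proofs are below) =====
def Claim_equal_birthday_cake_candles : Prop := ∀ (ar : List Int), Dom_birthday_cake_candles ar → Spec_birthday_cake_candles ar (birthday_cake_candles ar)

-- ===== LEMMAS AND PROOFS =====

lemma pvFoldA_some (l : List Int) : ∀ (t b : Int),
    l.foldl pvStepA (some t, b)
      = (some (l.foldl max t),
         (if l.foldl max t = t then b else 0) + (List.count (l.foldl max t) l : Int)) := by
  induction l with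
  | nil => intro t b; simp
  | cons c l ih =>
    intro t b
    rcases lt_trichotomy t c with h | h | h
    · have hstep : pvStepA (some t, b) c = (some c, 1) := by
        simp [pvStepA, h]
      have hmax : max t c = c := by omega
      have hMc : c ≤ l.foldl max c := (PySem.List.le_foldl_max l c).1
      simp only [List.foldl_cons, hstep, hmax, ih]
      have hMt : l.foldl max c ≠ t := by omega
      rw [List.count_cons]
      simp only [beq_iff_eq, Prod.mk.injEq, true_and]
      split_ifs <;> push_cast <;> omega
    · subst h
      have hstep : pvStepA (some t, b) t = (some t, b + 1) := by
        simp [pvStepA]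
      have hmax : max t t = t := max_self t
      simp only [List.foldl_cons, hstep, hmax, ih]
      rw [List.count_cons]
      simp only [beq_iff_eq, Prod.mk.injEq, true_and]
      split_ifs <;> push_cast <;> omega
    · have h1 : ¬ t < c := by omega
      have h2 : t ≠ c := by omega
      have hstep : pvStepA (some t, b) c = (some t, b) := by
        simp [pvStepA, h1, h2]
      have hmax : max t c = t := by omega
      have hMt : t ≤ l.foldl max t := (PySem.List.le_foldl_max l t).1
      simp only [List.foldl_cons, hstep, hmax, ih]
      have hcM : c ≠ l.foldl max t := by omega
      rw [List.count_cons]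
      simp only [beq_iff_eq, Prod.mk.injEq, true_and]
      split_ifs <;> push_cast <;> omega

-- ===== VERDICT (by name: the statement is the Claim_ definition above) =====
theorem birthday_cake_candles_spec : Claim_equal_birthday_cake_candles := by
  intro ar _
  unfold Spec_birthday_cake_candles birthday_cake_candles birthday_cake_candles_alt
  cases ar with
  | nil => simp
  | cons x l =>
    have hstep : pvStepA ((none : Option Int), (0 : Int)) x = (some x, 1) := by
      simp [pvStepA]
    simp only [List.foldl_cons, hstep, pvFoldA_some, PySem.List.max?_id_cons,
      PySem.List.count_eq, if_neg (List.cons_ne_nil x l)]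
    rw [List.count_cons]
    simp only [beq_iff_eq, Prod.mk.injEq, true_and]
    have hMx : x ≤ l.foldl max x := (PySem.List.le_foldl_max l x).1
    split_ifs <;> push_cast <;> omega
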